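-- pv_equiv track=rewrite | github.com/songleiwww/symphony | backup/snapshot_20260402_223553/config/compliance_engine.py | generate_reminder
-- ===== SOURCE A (Python) =====
-- def generate_reminder(violations: list, operation: str) -> str:
--     """生成规范提醒"""
--     if not violations:
--         return ""
--
--     lines = ["⚠️ **序境规范提醒**\n"]
--
--     critical = [v for v in violations if v[0] == "CRITICAL"]
--     warn = [v for v in violations if v[0] == "WARN"]
--     info = [v for v in violations if v[0] == "INFO"]
--
--     if critical:
--         lines.append("🚨 **严重违规（立即停止）:**")
--         for _, msg in critical:
--             lines.append(f"  ❌ {msg}")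
--         lines.append("")
--
--     if warn:
--         lines.append("⚡ **警告（需确认）:**")
--         for _, msg in warn:
--             lines.append(f"  ⚠️ {msg}")
--         lines.append("")
--
--     if info:
--         lines.append("💡 **建议:**")
--         for _, msg in info:
--             lines.append(f"  ℹ️ {msg}")
--         lines.append("")
--
--     lines.append(f"📋 操作: `{operation[:80]}{'...' if len(operation)>80 else ''}`")
--     lines.append("🔗 详见: `memory/2026-03-28.md` 或 `symphony_working.db·序境系统总则`")
--
--     return "\n".join(lines)
-- ===== SOURCE B (Python) =====
-- def generate_reminder(violations: list, operation: str) -> str: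
--     """Simpler: one pass bucketing messages by severity, then a table-driven emit."""
--     if not violations:
--         return ""
--
--     buckets = {}
--     for sev, msg in violations:
--         buckets.setdefault(sev, []).append(msg)
--
--     lines = ["⚠️ **序境规范提醒**\n"]
--     for key, header, prefix in (
--         ("CRITICAL", "🚨 **严重违规（立即停止）:**", "❌"),
--         ("WARN", "⚡ **警告（需确认）:**", "⚠️"),
--         ("INFO", "💡 **建议:**", "ℹ️"),
--     ):
--         msgs = buckets.get(key, [])
--         if msgs:
--             lines.append(header)
--             for m in msgs:
--                 lines.append(f"  {prefix} {m}")
--             lines.append("")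
--
--     lines.append(f"📋 操作: `{operation[:80]}{'...' if len(operation)>80 else ''}`")
--     lines.append("🔗 详见: `memory/2026-03-28.md` 或 `symphony_working.db·序境系统总则`")
--     return "\n".join(lines)
-- ===== Notes on version B (the rewrite author's own statement) =====
-- stated objective: simpler
-- what changed: Replaces A's three separate filter passes and three copy-pasted severity blocks with one bucketing pass over violations plus a single table-driven emit loop over (key, header, prefix) rows.
import Mathlib
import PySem

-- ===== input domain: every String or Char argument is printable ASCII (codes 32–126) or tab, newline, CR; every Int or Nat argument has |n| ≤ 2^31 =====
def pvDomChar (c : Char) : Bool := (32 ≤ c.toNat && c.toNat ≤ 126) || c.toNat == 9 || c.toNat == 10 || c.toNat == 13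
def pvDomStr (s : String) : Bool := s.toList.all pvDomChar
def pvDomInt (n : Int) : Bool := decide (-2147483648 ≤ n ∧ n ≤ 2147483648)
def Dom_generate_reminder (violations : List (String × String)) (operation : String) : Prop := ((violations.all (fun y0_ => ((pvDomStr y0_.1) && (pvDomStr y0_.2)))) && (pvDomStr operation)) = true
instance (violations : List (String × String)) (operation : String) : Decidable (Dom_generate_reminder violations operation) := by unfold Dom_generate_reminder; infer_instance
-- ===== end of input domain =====

-- B rewrites A's three severity-filter passes as one bucketing pass plus a table-driven emit loop (simpler decomposition, same output).

-- ===== PORT A =====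
def generate_reminder (violations : List (String × String)) (operation : String) : String :=
  if violations = [] then "" else
  let lines := ["⚠️ **序境规范提醒**\n"]
  let critical := violations.filter (fun v => v.1 == "CRITICAL")
  let warn := violations.filter (fun v => v.1 == "WARN")
  let info := violations.filter (fun v => v.1 == "INFO")
  let lines := if critical ≠ [] then
      (critical.foldl (fun acc p => acc ++ ["  ❌ " ++ p.2]) (lines ++ ["🚨 **严重违规（立即停止）:**"])) ++ [""]
    else lines
  let lines := if warn ≠ [] then
      (warn.foldl (fun acc p => acc ++ ["  ⚠️ " ++ p.2]) (lines ++ ["⚡ **警告（需确认）:**"])) ++ [""]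
    else lines
  let lines := if info ≠ [] then
      (info.foldl (fun acc p => acc ++ ["  ℹ️ " ++ p.2]) (lines ++ ["💡 **建议:**"])) ++ [""]
    else lines
  let lines := lines ++ ["📋 操作: `" ++ PySem.Str.slice operation none (some 80) ++ (if PySem.Str.len operation > 80 then "..." else "") ++ "`"]
  let lines := lines ++ ["🔗 详见: `memory/2026-03-28.md` 或 `symphony_working.db·序境系统总则`"]
  PySem.Str.join "\n" lines

-- ===== PORT B =====
def generate_reminder_alt (violations : List (String × String)) (operation : String) : String :=
  if violations = [] then "" else
  -- buckets.setdefault(sev, []).append(msg)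
  let buckets := violations.foldl (fun d p => d.modify p.1 [] (fun x => x ++ [p.2])) PySem.Dict.empty
  let table : List (String × String × String) :=
    [("CRITICAL", "🚨 **严重违规（立即停止）:**", "❌"),
     ("WARN", "⚡ **警告（需确认）:**", "⚠️"),
     ("INFO", "💡 **建议:**", "ℹ️")]
  let lines := table.foldl (fun acc t =>
      let msgs := buckets.getD t.1 []
      if msgs ≠ [] then acc ++ [t.2.1] ++ msgs.map (fun m => "  " ++ t.2.2 ++ " " ++ m) ++ [""]
      else acc)
    ["⚠️ **序境规范提醒**\n"]
  let lines := lines ++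
    ["📋 操作: `" ++ PySem.Str.slice operation none (some 80) ++ (if PySem.Str.len operation > 80 then "..." else "") ++ "`",
     "🔗 详见: `memory/2026-03-28.md` 或 `symphony_working.db·序境系统总则`"]
  PySem.Str.join "\n" lines

-- ===== PRECONDITION & SPEC =====
def Spec_generate_reminder (violations : List (String × String)) (operation : String) (out : String) : Prop := out = generate_reminder_alt violations operation
instance (violations : List (String × String)) (operation : String) (out : String) : Decidable (Spec_generate_reminder violations operation out) := by unfold Spec_generate_reminder; infer_instance

-- ===== CLAIM (what is proved, stated in full; the proofs are below) =====
def Claim_equal_generate_reminder : Prop := ∀ (violations : List (String × String)) (operation : String), Dom_generate_reminder violations operation → Spec_generate_reminder violations operation (generate_reminder violations operation)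

-- ===== LEMMAS AND PROOFS =====

-- ===== VERDICT (by name: the statement is the Claim_ definition above) =====
theorem generate_reminder_spec : Claim_equal_generate_reminder := by
  intro violations operation _
  unfold Spec_generate_reminder generate_reminder generate_reminder_alt
  by_cases h : violations = []
  · simp [h]
  · simp only [if_neg h, List.foldl_cons, List.foldl_nil,
      PySem.Dict.getD_foldl_modify_append, PySem.Dict.getD_empty,
      PySem.List.foldl_append_singleton_eq_map, List.nil_append, List.map_map]
    simp [Function.comp_def]
    simp only [List.map_eq_nil_iff]
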